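-- pv_equiv track=rewrite | github.com/vibhor-77/agi-mvp-arc-agi-1 | domains/arc/primitives.py | g_scale_by_color
-- ===== SOURCE A (Python) =====
-- Grid = list[list[int]]
--
-- def _clone(g: Grid) -> Grid:
--     # Optimized nested list slice is ~10-20x faster than deepcopy
--     return [row[:] for row in g]
--
-- def _rows(g: Grid) -> int:
--     return len(g)
--
-- def _cols(g: Grid) -> int:
--     return len(g[0]) if g else 0
--
-- def g_scale_by_color(g: Grid) -> Grid:
--     """
--     Scale each pixel into a block whose size equals its color value.
--     Each cell at (r, c) with value v creates a v×v filled block placed at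
--     pixel position (r * max_v, c * max_v), so blocks never overlap.
--     Zero cells leave their region empty.
--     """
--     flat = [v for row in g for v in row if v != 0]
--     if not flat:
--         return _clone(g)
--     max_v = max(flat)
--     if max_v == 0:
--         return _clone(g)
--     rows, cols = _rows(g), _cols(g)
--     out_rows, out_cols = rows * max_v, cols * max_v
--     if out_rows > 30 or out_cols > 30:
--         return _clone(g)
--     result = [[0] * out_cols for _ in range(out_rows)]
--     for r in range(rows):
--         for c in range(cols):
--             v = g[r][c]
--             if v == 0:
--                 continue
--             for dr in range(v):
--                 for dc in range(v):
--                     result[r * max_v + dr][c * max_v + dc] = v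
--     return result
-- ===== SOURCE B (Python) =====
-- def g_scale_by_color(g):
--     # single running-max scan, then build the output row-by-row by concatenating
--     # per-cell segments (no zero grid allocation, no in-place block fills)
--     max_v = None
--     for row in g:
--         for v in row:
--             if v != 0 and (max_v is None or v > max_v):
--                 max_v = v
--     if max_v is None:
--         return [list(row) for row in g]
--     rows = len(g)
--     cols = len(g[0]) if g else 0
--     if rows * max_v > 30 or cols * max_v > 30:
--         return [list(row) for row in g]
--     out = []
--     for row in g:
--         for dr in range(max_v):
--             out_row = []
--             for v in row[:cols]:
--                 if 0 < v and dr < v: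
--                     out_row += [v] * v + [0] * (max_v - v)
--                 else:
--                     out_row += [0] * max_v
--             out.append(out_row)
--     return out
-- ===== Notes on version B (the rewrite author's own statement) =====
-- stated objective: alternative
-- what changed: B finds the maximum nonzero value with a single running-max scan (no flattened intermediate list) and builds the result purely by concatenation: for each input row and each of max_v output rows it concatenates one length-max_v segment per cell ([v]*v+[0]*(max_v-v) when the row offset is inside the block, else zeros), instead of A's allocate-zero-grid-then-mutate block scatter.
import Mathlib
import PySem

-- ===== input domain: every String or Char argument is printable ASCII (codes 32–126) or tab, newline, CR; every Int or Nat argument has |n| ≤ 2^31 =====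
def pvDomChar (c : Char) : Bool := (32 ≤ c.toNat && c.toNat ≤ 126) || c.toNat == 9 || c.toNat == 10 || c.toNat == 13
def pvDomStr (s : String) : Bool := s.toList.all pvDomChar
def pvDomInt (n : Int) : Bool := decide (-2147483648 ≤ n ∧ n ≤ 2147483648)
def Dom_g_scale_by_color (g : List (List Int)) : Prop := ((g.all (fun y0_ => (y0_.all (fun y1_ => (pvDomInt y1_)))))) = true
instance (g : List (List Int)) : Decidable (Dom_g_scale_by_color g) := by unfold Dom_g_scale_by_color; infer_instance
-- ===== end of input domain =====

-- B replaces A's allocate-then-mutate block scatter by a running-max scan followed by a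
-- purely concatenative row builder (objective: alternative, same asymptotic cost).

-- ===== PORT A =====
-- result[i][j] = v (Python list assignment; indices are in range whenever A executes it)
def pvSet2 (res : List (List Int)) (i j : Nat) (v : Int) : List (List Int) :=
  res.set i ((res.getD i []).set j v)

-- Python `g[r][c]` is ported as getD 0: inside Pre_ every index A dereferences is in range,
-- so the default is never read; `range(n)` with a provably ≥ 0 bound is ported as List.range / .toNat.
def g_scale_by_color (g : List (List Int)) : List (List Int) :=
  let flat := g.flatMap (fun row => row.filter (fun v => v != 0))
  if flat = [] then g.map (fun row => row)
  else
    let maxv := (PySem.List.max? flat (fun v => v)).getD 0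
    if maxv = 0 then g.map (fun row => row)
    else
      let rows := g.length
      let cols := (g.headD []).length
      let outRows : Int := (rows : Int) * maxv
      let outCols : Int := (cols : Int) * maxv
      if outRows > 30 ∨ outCols > 30 then g.map (fun row => row)
      else
        (List.range rows).foldl (fun res r =>
          (List.range cols).foldl (fun res c =>
            let v := (g.getD r []).getD c 0
            if v = 0 then res
            else (List.range v.toNat).foldl (fun res dr =>
              (List.range v.toNat).foldl (fun res dc =>
                pvSet2 res (r * maxv.toNat + dr) (c * maxv.toNat + dc) v) res) res) res)
          ((List.range outRows.toNat).map (fun _ => List.replicate outCols.toNat (0 : Int)))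

-- ===== PORT B =====
-- `if v != 0 and (max_v is None or v > max_v): max_v = v`
def pvStep (acc : Option Int) (v : Int) : Option Int :=
  match acc with
  | none => if v ≠ 0 then some v else none
  | some a => if v ≠ 0 ∧ a < v then some v else some a

-- the running-max double loop over the grid
def pvRunMax (g : List (List Int)) : Option Int :=
  g.foldl (fun acc row => row.foldl pvStep acc) none

-- one length-max_v segment of an output row, contributed by one input cell
def pvSeg (m v : Int) (dr : Nat) : List Int :=
  if 0 < v ∧ (dr : Int) < v then List.replicate v.toNat v ++ List.replicate (m - v).toNat 0
  else List.replicate m.toNat 0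

def g_scale_by_color_alt (g : List (List Int)) : List (List Int) :=
  match pvRunMax g with
  | none => g.map (fun row => row.map (fun v => v))
  | some m =>
    if (g.length : Int) * m > 30 ∨ ((g.headD []).length : Int) * m > 30 then
      g.map (fun row => row.map (fun v => v))
    else
      g.flatMap (fun row =>
        (List.range m.toNat).map (fun dr =>
          (row.take (g.headD []).length).flatMap (fun v => pvSeg m v dr)))

-- ===== PRECONDITION & SPEC =====
-- Pre_ holds exactly when A returns: A's fill loop reads g[r][c] for every c < len(g[0]),
-- raising IndexError on a row shorter than the first unless one of A's early-return guards
-- (all cells zero, or output larger than 30) fires first.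
def Pre_g_scale_by_color (g : List (List Int)) : Prop :=
  (∀ row ∈ g, (g.headD []).length ≤ row.length)
  ∨ g.flatMap (fun row => row.filter (fun v => v != 0)) = []
  ∨ (g.length : Int) * ((PySem.List.max? (g.flatMap (fun row => row.filter (fun v => v != 0))) (fun v => v)).getD 0) > 30
  ∨ ((g.headD []).length : Int) * ((PySem.List.max? (g.flatMap (fun row => row.filter (fun v => v != 0))) (fun v => v)).getD 0) > 30
instance (g : List (List Int)) : Decidable (Pre_g_scale_by_color g) := by
  unfold Pre_g_scale_by_color; infer_instance

def pvWitness_g_scale_by_color : List (List Int) := [[1, 2], [2, 1]]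

def Spec_g_scale_by_color (g : List (List Int)) (out : List (List Int)) : Prop := out = g_scale_by_color_alt g
instance (g : List (List Int)) (out : List (List Int)) : Decidable (Spec_g_scale_by_color g out) := by unfold Spec_g_scale_by_color; infer_instance

-- ===== CLAIM (what is proved, stated in full; the proofs are below) =====
def Claim_equal_g_scale_by_color : Prop := ∀ (g : List (List Int)), Dom_g_scale_by_color g → Pre_g_scale_by_color g → Spec_g_scale_by_color g (g_scale_by_color g)

-- ===== LEMMAS AND PROOFS =====

-- the common gather cell formula both sides are reduced to
def pvF (g : List (List Int)) (M R C : Nat) : Int :=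
  if ((R % M : Int) < (g.getD (R / M) []).getD (C / M) 0 ∧ (C % M : Int) < (g.getD (R / M) []).getD (C / M) 0)
  then (g.getD (R / M) []).getD (C / M) 0 else 0

-- a grid given by a cell function
def pvTbl (nr nc : Nat) (f : Nat → Nat → Int) : List (List Int) :=
  (List.range nr).map (fun R => (List.range nc).map (fun C => f R C))

-- partial-progress cell function while A scatters: rows before r done, then row r up to column c
def pvG (g : List (List Int)) (M r c R C : Nat) : Int :=
  if R / M < r ∨ (R / M = r ∧ C / M < c) then pvF g M R C else 0

theorem pvFoldInv {α : Type} (f : α → Nat → α) (P : Nat → α → Prop) (n : Nat) (a : α)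
    (h0 : P 0 a) (hs : ∀ k b, k < n → P k b → P (k + 1) (f b k)) :
    P n ((List.range n).foldl f a) := by
  induction n with
  | zero => simpa using h0
  | succ n ih =>
    rw [List.range_succ, List.foldl_append]
    exact hs n _ (Nat.lt_succ_self n)
      (ih (fun k b hk hp => hs k b (Nat.lt_succ_of_lt hk) hp))

theorem pvFoldlPreserve {α β : Type} (P : α → Prop) (f : α → β → α)
    (h : ∀ a b, P a → P (f a b)) : ∀ (l : List β) (a : α), P a → P (l.foldl f a) := by
  intro l
  induction l with
  | nil => intro a ha; simpa using ha
  | cons x xs ih => intro a ha; rw [List.foldl_cons]; exact ih _ (h a x ha)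

theorem pvSetMapRange {β : Type} (n j : Nat) (f : Nat → β) (v : β) (hj : j < n) :
    ((List.range n).map f).set j v = (List.range n).map (fun k => if k = j then v else f k) := by
  apply List.ext_getElem
  · simp
  · intro i h1 h2
    simp only [List.getElem_set, List.getElem_map, List.getElem_range]
    by_cases h : i = j
    · subst h; simp
    · simp [h, Ne.symm h]

theorem pvTblGetD (nr nc : Nat) (f : Nat → Nat → Int) (i : Nat) (hi : i < nr) :
    (pvTbl nr nc f).getD i [] = (List.range nc).map (fun C => f i C) := by
  rw [List.getD_eq_getElem _ _ (by simp [pvTbl, hi])]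
  simp [pvTbl]

theorem pvSet2Tbl (nr nc : Nat) (f : Nat → Nat → Int) (i j : Nat) (v : Int)
    (hi : i < nr) (hj : j < nc) :
    pvSet2 (pvTbl nr nc f) i j v
      = pvTbl nr nc (fun R C => if R = i ∧ C = j then v else f R C) := by
  unfold pvSet2
  rw [pvTblGetD nr nc f i hi, pvSetMapRange nc j _ v hj]
  show (pvTbl nr nc f).set i _ = _
  unfold pvTbl
  rw [pvSetMapRange nr i _ _ hi]
  apply List.map_congr_left
  intro R hR
  by_cases hRi : R = i
  · subst hRi
    rw [if_pos rfl]
    apply List.map_congr_left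
    intro C hC
    by_cases hCj : C = j <;> simp [hCj]
  · simp only [if_neg hRi]
    apply List.map_congr_left
    intro C hC
    simp [hRi]

theorem pvTblCongr (nr nc : Nat) (f f' : Nat → Nat → Int)
    (h : ∀ R < nr, ∀ C < nc, f R C = f' R C) : pvTbl nr nc f = pvTbl nr nc f' := by
  unfold pvTbl
  apply List.map_congr_left
  intro R hR
  simp only [List.mem_range] at hR
  apply List.map_congr_left
  intro C hC
  simp only [List.mem_range] at hC
  exact h R hR C hC

theorem pvBlockIdx (M c t X : Nat) (hM : 0 < M) (ht : t < M) :
    X = c * M + t ↔ X / M = c ∧ X % M = t := by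
  constructor
  · rintro rfl
    refine ⟨?_, ?_⟩
    · rw [Nat.add_comm, Nat.add_mul_div_right _ _ hM, Nat.div_eq_of_lt ht, Nat.zero_add]
    · rw [Nat.mul_comm, Nat.mul_add_mod, Nat.mod_eq_of_lt ht]
  · rintro ⟨h1, h2⟩
    have h3 := Nat.div_add_mod X M
    rw [h1, h2, Nat.mul_comm] at h3
    exact h3.symm

theorem pvDcFold (nr nc M : Nat) (hM : 0 < M) (i c : Nat) (v : Int) (f : Nat → Nat → Int)
    (hi : i < nr) (hspan : c * M + M ≤ nc) (hvM : v.toNat ≤ M) :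
    (List.range v.toNat).foldl (fun res dc => pvSet2 res i (c * M + dc) v) (pvTbl nr nc f)
      = pvTbl nr nc (fun R C => if R = i ∧ C / M = c ∧ C % M < v.toNat then v else f R C) := by
  refine pvFoldInv _ (fun t res => res = pvTbl nr nc
    (fun R C => if R = i ∧ C / M = c ∧ C % M < t then v else f R C)) _ _ ?_ ?_
  · exact (pvTblCongr _ _ _ _ (by intro R hR C hC; simp)).symm
  · intro t res ht hres
    have htM : t < M := lt_of_lt_of_le ht hvM
    rw [hres,
      pvSet2Tbl nr nc _ i (c * M + t) v hi (lt_of_lt_of_le (Nat.add_lt_add_left htM _) hspan)]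
    apply pvTblCongr
    intro R hR C hC
    simp only [pvBlockIdx M c t C hM htM]
    split_ifs <;> first | rfl | omega

theorem pvDrFold (nr nc M : Nat) (hM : 0 < M) (r c : Nat) (v : Int) (f : Nat → Nat → Int)
    (hrspan : r * M + M ≤ nr) (hcspan : c * M + M ≤ nc) (hvM : v.toNat ≤ M) :
    (List.range v.toNat).foldl (fun res dr =>
        (List.range v.toNat).foldl (fun res dc => pvSet2 res (r * M + dr) (c * M + dc) v) res)
      (pvTbl nr nc f)
      = pvTbl nr nc (fun R C =>
          if R / M = r ∧ R % M < v.toNat ∧ C / M = c ∧ C % M < v.toNat then v else f R C) := by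
  refine pvFoldInv _ (fun t res => res = pvTbl nr nc
    (fun R C => if R / M = r ∧ R % M < t ∧ C / M = c ∧ C % M < v.toNat then v else f R C)) _ _ ?_ ?_
  · exact (pvTblCongr _ _ _ _ (by intro R hR C hC; simp)).symm
  · intro t res ht hres
    have htM : t < M := lt_of_lt_of_le ht hvM
    rw [hres,
      pvDcFold nr nc M hM (r * M + t) c v _ (lt_of_lt_of_le (Nat.add_lt_add_left htM _) hrspan) hcspan hvM]
    apply pvTblCongr
    intro R hR C hC
    simp only [pvBlockIdx M r t R hM htM]
    split_ifs <;> first | rfl | omega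

theorem pvCFold (g : List (List Int)) (m : Int) (hm : 0 < m) (rows cols r : Nat)
    (hr : r < rows) (Hb : ∀ c, c < cols → (g.getD r []).getD c 0 ≤ m) :
    (List.range cols).foldl (fun res c =>
        let v := (g.getD r []).getD c 0
        if v = 0 then res
        else (List.range v.toNat).foldl (fun res dr =>
          (List.range v.toNat).foldl (fun res dc =>
            pvSet2 res (r * m.toNat + dr) (c * m.toNat + dc) v) res) res)
      (pvTbl (rows * m.toNat) (cols * m.toNat) (pvG g m.toNat r 0))
      = pvTbl (rows * m.toNat) (cols * m.toNat) (pvG g m.toNat r cols) := by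
  have hM : 0 < m.toNat := by omega
  refine pvFoldInv _ (fun k res => res = pvTbl (rows * m.toNat) (cols * m.toNat) (pvG g m.toNat r k)) _ _ rfl ?_
  intro k res hk hres
  rw [hres]
  show (let v := (g.getD r []).getD k 0
        if v = 0 then pvTbl (rows * m.toNat) (cols * m.toNat) (pvG g m.toNat r k)
        else (List.range v.toNat).foldl (fun res dr =>
          (List.range v.toNat).foldl (fun res dc =>
            pvSet2 res (r * m.toNat + dr) (k * m.toNat + dc) v) res)
          (pvTbl (rows * m.toNat) (cols * m.toNat) (pvG g m.toNat r k)))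
      = pvTbl (rows * m.toNat) (cols * m.toNat) (pvG g m.toNat r (k + 1))
  by_cases hpos : 0 < (g.getD r []).getD k 0
  · rw [if_neg (by omega)]
    have hvM : ((g.getD r []).getD k 0).toNat ≤ m.toNat := by
      have := Hb k hk; omega
    rw [pvDrFold (rows * m.toNat) (cols * m.toNat) m.toNat hM r k _ _
      (by
        have h := Nat.mul_le_mul_right m.toNat (show r + 1 ≤ rows by omega)
        rw [Nat.succ_mul] at h; exact h)
      (by
        have h := Nat.mul_le_mul_right m.toNat (show k + 1 ≤ cols by omega)
        rw [Nat.succ_mul] at h; exact h)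
      hvM]
    apply pvTblCongr
    intro R hR C hC
    unfold pvG
    by_cases hblk : R / m.toNat = r ∧ C / m.toNat = k
    · have hFv : pvF g m.toNat R C =
        if ((R % m.toNat : Int) < (g.getD r []).getD k 0 ∧ (C % m.toNat : Int) < (g.getD r []).getD k 0)
        then (g.getD r []).getD k 0 else 0 := by
        simp only [pvF, hblk.1, hblk.2]
      rw [hFv]
      split_ifs <;> first | rfl | omega
    · split_ifs <;> first | rfl | omega
  · have hcong : pvTbl (rows * m.toNat) (cols * m.toNat) (pvG g m.toNat r k)
        = pvTbl (rows * m.toNat) (cols * m.toNat) (pvG g m.toNat r (k + 1)) := by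
      apply pvTblCongr
      intro R hR C hC
      unfold pvG
      by_cases hblk : R / m.toNat = r ∧ C / m.toNat = k
      · have hF0 : pvF g m.toNat R C = 0 := by
          simp only [pvF, hblk.1, hblk.2]
          split_ifs with h
          · omega
          · rfl
        rw [hF0]
        split_ifs <;> rfl
      · split_ifs <;> first | rfl | omega
    by_cases hz : (g.getD r []).getD k 0 = 0
    · rw [if_pos hz]
      exact hcong
    · rw [if_neg hz]
      have h0 : ((g.getD r []).getD k 0).toNat = 0 := by omega
      rw [h0]
      simp only [List.range_zero, List.foldl_nil]
      exact hcong

theorem pvRFold (g : List (List Int)) (m : Int) (hm : 0 < m) (rows cols : Nat)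
    (Hb : ∀ r, r < rows → ∀ c, c < cols → (g.getD r []).getD c 0 ≤ m) :
    (List.range rows).foldl (fun res r =>
        (List.range cols).foldl (fun res c =>
          let v := (g.getD r []).getD c 0
          if v = 0 then res
          else (List.range v.toNat).foldl (fun res dr =>
            (List.range v.toNat).foldl (fun res dc =>
              pvSet2 res (r * m.toNat + dr) (c * m.toNat + dc) v) res) res) res)
      (pvTbl (rows * m.toNat) (cols * m.toNat) (fun _ _ => 0))
      = pvTbl (rows * m.toNat) (cols * m.toNat)
          (fun R C => if R / m.toNat < rows then pvF g m.toNat R C else 0) := by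
  have hM : 0 < m.toNat := by omega
  refine pvFoldInv _ (fun r res => res = pvTbl (rows * m.toNat) (cols * m.toNat)
    (fun R C => if R / m.toNat < r then pvF g m.toNat R C else 0)) _ _ ?_ ?_
  · exact (pvTblCongr _ _ _ _ (by intro R hR C hC; simp)).symm
  · intro r res hr hres
    rw [hres]
    have hbase : pvTbl (rows * m.toNat) (cols * m.toNat)
        (fun R C => if R / m.toNat < r then pvF g m.toNat R C else 0)
        = pvTbl (rows * m.toNat) (cols * m.toNat) (pvG g m.toNat r 0) := by
      apply pvTblCongr
      intro R hR C hC
      simp [pvG]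
    rw [hbase, pvCFold g m hm rows cols r hr (Hb r hr)]
    apply pvTblCongr
    intro R hR C hC
    have hCc : C / m.toNat < cols := Nat.div_lt_of_lt_mul (by rw [Nat.mul_comm]; exact hC)
    unfold pvG
    split_ifs <;> first | rfl | omega

theorem pvSet2Nil (i j : Nat) (v : Int) : pvSet2 [] i j v = [] := by
  simp [pvSet2]

-- ===== B-side lemmas =====

-- nested fold = fold over the flattened grid
theorem pvRunMaxFlatten (g : List (List Int)) :
    ∀ acc, g.foldl (fun acc row => row.foldl pvStep acc) acc = g.flatten.foldl pvStep acc := by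
  induction g with
  | nil => intro acc; rfl
  | cons row t ih =>
    intro acc
    simp only [List.foldl_cons, List.flatten_cons, List.foldl_append]
    exact ih _

-- the step ignores zeros: fold = fold over the nonzero filter
theorem pvStepFilter (l : List Int) :
    ∀ acc, l.foldl pvStep acc = (l.filter (fun v => v != 0)).foldl pvStep acc := by
  induction l with
  | nil => intro acc; rfl
  | cons v t ih =>
    intro acc
    by_cases hv : v = 0
    · subst hv
      have h0 : pvStep acc 0 = acc := by
        unfold pvStep; cases acc <;> simp
      simp only [List.foldl_cons, List.filter_cons, h0]
      norm_num
      exact ih acc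
    · simp only [List.foldl_cons, List.filter_cons]
      have : (v != 0) = true := by simpa using hv
      rw [this]
      simp only [if_pos rfl, List.foldl_cons]
      exact ih _

-- once acc is some a, the fold computes the running max
theorem pvStepMax (l : List Int) (hl : ∀ v ∈ l, v ≠ 0) :
    ∀ a, l.foldl pvStep (some a) = some (l.foldl max a) := by
  induction l with
  | nil => intro a; rfl
  | cons v t ih =>
    intro a
    have hv : v ≠ 0 := hl v (List.mem_cons_self)
    have ht : ∀ w ∈ t, w ≠ 0 := fun w hw => hl w (List.mem_cons_of_mem _ hw)
    simp only [List.foldl_cons]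
    have hstep : pvStep (some a) v = some (max a v) := by
      show (if v ≠ 0 ∧ a < v then some v else some a) = some (max a v)
      split_ifs with h
      · congr 1
        omega
      · have hge : ¬ a < v := by
          rcases not_and_or.mp h with h1 | h2
          · exact absurd hv (by simpa using h1)
          · exact h2
        congr 1
        omega
    rw [hstep]
    exact ih ht _

-- B's running max equals A's max(flat)
theorem pvRunMaxEq (g : List (List Int)) :
    pvRunMax g = PySem.List.max? (g.flatMap (fun row => row.filter (fun v => v != 0))) (fun v => v) := by
  have hflat : g.flatMap (fun row => row.filter (fun v => v != 0))
      = g.flatten.filter (fun v => v != 0) := by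
    induction g with
    | nil => rfl
    | cons row t ih => simp only [List.flatMap_cons, List.flatten_cons, List.filter_append, ih]
  unfold pvRunMax
  rw [pvRunMaxFlatten, pvStepFilter, ← hflat]
  cases h : g.flatMap (fun row => row.filter (fun v => v != 0)) with
  | nil => simp [PySem.List.max?]
  | cons x t =>
    have hnz : ∀ v ∈ x :: t, v ≠ 0 := by
      intro v hv
      rw [← h] at hv
      obtain ⟨row, _, hin⟩ := List.mem_flatMap.mp hv
      have := List.of_mem_filter hin
      simpa using this
    have hx : x ≠ 0 := hnz x List.mem_cons_self
    have ht : ∀ v ∈ t, v ≠ 0 := fun v hv => hnz v (List.mem_cons_of_mem _ hv)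
    rw [List.foldl_cons]
    have hstep : pvStep none x = some x := by unfold pvStep; simp [hx]
    rw [hstep, pvStepMax t ht x, PySem.List.max?_id_cons]

-- a list of length n equals the range-map of its getD
theorem pvListAsRangeMap {β : Type} (e : β) (l : List β) :
    (List.range l.length).map (fun i => l.getD i e) = l := by
  apply List.ext_getElem
  · simp
  · intro i h1 h2
    simp only [List.getElem_map, List.getElem_range]
    rw [List.getD_eq_getElem _ _ h2]

-- getD of a range-map below the bound
theorem pvRangeMapGetD {β : Type} (e : β) (M t : Nat) (h : Nat → β) (ht : t < M) :
    ((List.range M).map h).getD t e = h t := by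
  rw [List.getD_eq_getElem _ _ (by simpa using ht)]
  simp

-- flatMap with uniform block length M, as an indexed range-map
theorem pvFlatMapUniform {α β : Type} (f : α → List β) (M : Nat) (hM : 0 < M) (d : α) (e : β) :
    ∀ (l : List α), (∀ a ∈ l, (f a).length = M) →
    l.flatMap f = (List.range (l.length * M)).map (fun R => (f (l.getD (R / M) d)).getD (R % M) e) := by
  intro l
  induction l with
  | nil => intro _; simp
  | cons a t ih =>
    intro h
    have ha : (f a).length = M := h a List.mem_cons_self
    have ht : ∀ b ∈ t, (f b).length = M := fun b hb => h b (List.mem_cons_of_mem _ hb)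
    have hlen : (a :: t).length * M = M + t.length * M := by
      simp [List.length_cons, Nat.succ_mul, Nat.add_comm]
    rw [List.flatMap_cons, hlen, List.range_add, List.map_append, List.map_map]
    congr 1
    · have hcg : ∀ R ∈ List.range M,
          (f ((a :: t).getD (R / M) d)).getD (R % M) e = (f a).getD R e := by
        intro R hR
        simp only [List.mem_range] at hR
        rw [Nat.div_eq_of_lt hR, Nat.mod_eq_of_lt hR]
        rfl
      symm
      rw [List.map_congr_left hcg, ← ha, pvListAsRangeMap]
    · rw [ih ht]
      apply List.map_congr_left
      intro R hR
      simp only [Function.comp]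
      have h1 : (M + R) / M = R / M + 1 := by
        rw [Nat.add_comm, Nat.add_div_right _ hM]
      have h2 : (M + R) % M = R % M := by
        rw [Nat.add_comm, Nat.add_mod_right]
      rw [h1, h2]
      rfl

-- a cell of pvSeg
theorem pvSegGetD (m v : Int) (hm : 0 < m) (hvm : v ≤ m) (dr t : Nat) (ht : t < m.toNat) :
    (pvSeg m v dr).getD t 0 = (if ((dr : Int) < v ∧ (t : Int) < v) then v else 0) := by
  unfold pvSeg
  split_ifs with h1 h2
  · -- inside the block row, inside the value width
    have htv : t < v.toNat := by omega
    rw [List.getD_eq_getElem _ _ (by simp; omega)]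
    rw [List.getElem_append_left (by simpa using htv)]
    simp
  · -- inside the block row, past the value width
    have htv : ¬ t < v.toNat := by omega
    rw [List.getD_eq_getElem _ _ (by simp; omega)]
    rw [List.getElem_append_right (by simpa using htv)]
    simp
  · -- zero row
    exfalso
    omega
  · rw [List.getD_eq_getElem _ _ (by simpa using ht)]
    simp

theorem pvSegLen (m v : Int) (hm : 0 < m) (hvm : v ≤ m) (dr : Nat) :
    (pvSeg m v dr).length = m.toNat := by
  unfold pvSeg
  split_ifs with h
  · simp; omega
  · simp

-- ===== VERDICT (by name: the statement is the Claim_ definition above) =====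
theorem g_scale_by_color_spec : Claim_equal_g_scale_by_color := by
  intro g _ hpre
  unfold Spec_g_scale_by_color g_scale_by_color
  simp only []
  split_ifs with h1 h2 h3
  · -- flat = []: both clone
    unfold g_scale_by_color_alt
    rw [pvRunMaxEq, (PySem.List.max?_eq_none_iff _ _).mpr h1]
    simp [List.map_id']
  · -- max = 0: impossible (flat holds only nonzero values)
    exfalso
    obtain ⟨mm, hmax⟩ : ∃ mm, PySem.List.max? (g.flatMap (fun row => row.filter (fun v => v != 0))) (fun v => v) = some mm := by
      cases h : PySem.List.max? (g.flatMap (fun row => row.filter (fun v => v != 0))) (fun v => v) with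
      | none => exact absurd ((PySem.List.max?_eq_none_iff _ _).mp h) h1
      | some mm => exact ⟨mm, rfl⟩
    rw [hmax] at h2
    simp only [Option.getD_some] at h2
    have hmem := PySem.List.max?_mem hmax
    obtain ⟨row, _, hin⟩ := List.mem_flatMap.mp hmem
    have := List.of_mem_filter hin
    rw [h2] at this
    simp at this
  · -- oversize guard: both clone
    obtain ⟨mm, hmax⟩ : ∃ mm, PySem.List.max? (g.flatMap (fun row => row.filter (fun v => v != 0))) (fun v => v) = some mm := by
      cases h : PySem.List.max? (g.flatMap (fun row => row.filter (fun v => v != 0))) (fun v => v) with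
      | none => exact absurd ((PySem.List.max?_eq_none_iff _ _).mp h) h1
      | some mm => exact ⟨mm, rfl⟩
    rw [hmax] at h3
    simp only [Option.getD_some] at h3
    unfold g_scale_by_color_alt
    rw [pvRunMaxEq, hmax]
    simp only []
    rw [if_pos h3]
    simp [List.map_id']
  · -- main branch
    obtain ⟨mm, hmax⟩ : ∃ mm, PySem.List.max? (g.flatMap (fun row => row.filter (fun v => v != 0))) (fun v => v) = some mm := by
      cases h : PySem.List.max? (g.flatMap (fun row => row.filter (fun v => v != 0))) (fun v => v) with
      | none => exact absurd ((PySem.List.max?_eq_none_iff _ _).mp h) h1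
      | some mm => exact ⟨mm, rfl⟩
    rw [hmax] at h2 h3
    simp only [Option.getD_some] at h2 h3
    rw [hmax]
    simp only [Option.getD_some]
    unfold g_scale_by_color_alt
    rw [pvRunMaxEq, hmax]
    simp only []
    rw [if_neg h3]
    have hrect : ∀ row ∈ g, (g.headD []).length ≤ row.length := by
      rcases hpre with h | h | h | h
      · exact h
      · exact absurd h h1
      · exact absurd (Or.inl (by simpa [hmax] using h)) h3
      · exact absurd (Or.inr (by simpa [hmax] using h)) h3
    rcases lt_trichotomy mm 0 with hneg | hzero | hposm
    · -- negative maximum: both sides are the empty grid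
      have hz : ((g.length : Int) * mm).toNat = 0 :=
        Int.toNat_of_nonpos (mul_nonpos_iff.mpr (Or.inl ⟨Int.natCast_nonneg _, hneg.le⟩))
      have hmz : mm.toNat = 0 := by omega
      rw [hz, hmz]
      simp only [List.range_zero, List.map_nil]
      have hB : g.flatMap (fun _ : List Int => ([] : List (List Int))) = [] := by simp
      rw [hB]
      refine pvFoldlPreserve (fun res => res = []) _ ?_ _ _ rfl
      intro res r hres
      refine pvFoldlPreserve (fun res => res = []) _ ?_ _ _ hres
      intro res2 c hres2
      dsimp only
      split_ifs
      · exact hres2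
      · refine pvFoldlPreserve (fun res => res = []) _ ?_ _ _ hres2
        intro res3 dr hres3
        refine pvFoldlPreserve (fun res => res = []) _ ?_ _ _ hres3
        intro res4 dc hres4
        rw [hres4]
        exact pvSet2Nil _ _ _
    · exact absurd hzero h2
    · -- positive maximum: scatter = concatenative gather
      have hM : 0 < mm.toNat := by omega
      have hcastR : ((g.length : Int) * mm).toNat = g.length * mm.toNat := by
        conv_lhs => rw [← Int.toNat_of_nonneg hposm.le]
        rw [← Nat.cast_mul, Int.toNat_natCast]
      have hcastC : (((g.headD []).length : Int) * mm).toNat = (g.headD []).length * mm.toNat := by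
        conv_lhs => rw [← Int.toNat_of_nonneg hposm.le]
        rw [← Nat.cast_mul, Int.toNat_natCast]
      rw [hcastR, hcastC]
      have hinit : (List.range (g.length * mm.toNat)).map
          (fun _ => List.replicate ((g.headD []).length * mm.toNat) (0 : Int))
          = pvTbl (g.length * mm.toNat) ((g.headD []).length * mm.toNat) (fun _ _ => 0) := by
        unfold pvTbl
        apply List.map_congr_left
        intro R hR
        rw [List.map_const', List.length_range]
      have Hbmem : ∀ row ∈ g, ∀ v ∈ row, v ≠ 0 → v ≤ mm := by
        intro row hrow v hv hnz
        have hmemflat : v ∈ g.flatMap (fun r => r.filter (fun w => w != 0)) :=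
          List.mem_flatMap.mpr ⟨row, hrow, List.mem_filter.mpr ⟨hv, by simp [hnz]⟩⟩
        exact PySem.List.max?_isMax hmax _ hmemflat
      have Hb : ∀ r, r < g.length → ∀ c, c < (g.headD []).length → (g.getD r []).getD c 0 ≤ mm := by
        intro r hr c hc
        have hgr : g.getD r [] = g[r] := List.getD_eq_getElem g [] hr
        have hmemr : g[r] ∈ g := List.getElem_mem hr
        have hc' : c < g[r].length := lt_of_lt_of_le hc (hrect _ hmemr)
        have hval : (g.getD r []).getD c 0 = g[r][c] := by rw [hgr]; exact List.getD_eq_getElem _ _ hc'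
        by_cases hz : g[r][c] = 0
        · rw [hval, hz]; omega
        · rw [hval]; exact Hbmem _ hmemr _ (List.getElem_mem hc') hz
      rw [hinit, pvRFold g mm hposm g.length (g.headD []).length Hb]
      -- B side: two applications of the uniform-flatMap lemma
      set cols := (g.headD []).length with hcols
      have hRowLen : ∀ row ∈ g,
          ((List.range mm.toNat).map
            (fun dr => (row.take cols).flatMap (fun v => pvSeg mm v dr))).length = mm.toNat := by
        intro row _; simp
      rw [pvFlatMapUniform _ mm.toNat hM [] [] g hRowLen]
      unfold pvTbl
      apply List.map_congr_left
      intro R hR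
      simp only [List.mem_range] at hR
      have hRr : R / mm.toNat < g.length := Nat.div_lt_of_lt_mul (by rw [Nat.mul_comm]; exact hR)
      have hRm : R % mm.toNat < mm.toNat := Nat.mod_lt _ hM
      rw [pvRangeMapGetD [] mm.toNat (R % mm.toNat) _ hRm]
      -- the row g.getD (R / M) is a member of g
      have hgrow : g.getD (R / mm.toNat) [] = g[R / mm.toNat] := List.getD_eq_getElem g [] hRr
      have hmemrow : g[R / mm.toNat] ∈ g := List.getElem_mem hRr
      have htakelen : (g[R / mm.toNat].take cols).length = cols := by
        rw [List.length_take]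
        exact Nat.min_eq_left (hrect _ hmemrow)
      have hSegLen : ∀ v ∈ g[R / mm.toNat].take cols, (pvSeg mm v (R % mm.toNat)).length = mm.toNat := by
        intro v hv
        have hvrow : v ∈ g[R / mm.toNat] := List.mem_of_mem_take hv
        by_cases hz : v = 0
        · subst hz; unfold pvSeg; simp
        · exact pvSegLen mm v hposm (Hbmem _ hmemrow _ hvrow hz) _
      rw [hgrow, pvFlatMapUniform _ mm.toNat hM 0 0 _ hSegLen, htakelen]
      apply List.map_congr_left
      intro C hC
      simp only [List.mem_range] at hC
      have hCc : C / mm.toNat < cols := Nat.div_lt_of_lt_mul (by rw [Nat.mul_comm]; exact hC)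
      have hCm : C % mm.toNat < mm.toNat := Nat.mod_lt _ hM
      have hclen : C / mm.toNat < g[R / mm.toNat].length := lt_of_lt_of_le hCc (hrect _ hmemrow)
      have htakeget : (g[R / mm.toNat].take cols).getD (C / mm.toNat) 0
          = g[R / mm.toNat][C / mm.toNat] := by
        rw [List.getD_eq_getElem _ _ (by rw [htakelen]; exact hCc)]
        exact List.getElem_take
      have hvm : g[R / mm.toNat][C / mm.toNat] ≤ mm := by
        by_cases hz : g[R / mm.toNat][C / mm.toNat] = 0
        · omega
        · exact Hbmem _ hmemrow _ (List.getElem_mem hclen) hz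
      rw [htakeget, pvSegGetD mm _ hposm hvm _ _ hCm]
      simp only []
      rw [if_pos hRr]
      unfold pvF
      rw [hgrow, List.getD_eq_getElem _ _ hclen]
      push_cast
      rfl
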